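-- pv_equiv track=rewrite | github.com/EesunMoon/leetcode | Concept/Samsung/01.py | solution
-- ===== SOURCE A (Python) =====
-- def solution(n, k):
--     # LED 디스플레이의 가로 크기 n과 시간 k가 주어질 때, 1(ON) 상태에 있는 픽셀 개수
--     # matrix size: n x 4
--     # 1: ON, 2: OFF
--
--     # TC O(nk) SC O(n)
--     matrix = [[0] * 4 for _ in range(n)] # inital status
--
--     for t in range(1, k+1):
--         for i in range(n):
--             for j in range(4):
--                 if (i+j+1) % t == 0:
--                     matrix[i][j] ^= 1
--
--     return sum(sum(r) for r in matrix)
-- ===== SOURCE B (Python) =====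
-- def solution(n, k):
--     # Cell (i, j) holds value v = i+j+1 and ends ON iff v has an odd number of
--     # divisors in [1, k].  The distinct values are 1..n+3, each shared by several
--     # cells, so: (1) one multiples sieve fills cnt[v] = #divisors of v in [1, k]
--     # for all values at once, (2) each value's parity is weighted by how many
--     # cells carry it.  No simulation and no per-cell divisor scan.
--     m = n + 3
--     cnt = [0] * (m + 1)
--     for d in range(1, min(k, m) + 1):
--         for q in range(d, m + 1, d):
--             cnt[q] += 1
--     total = 0
--     for v in range(1, m + 1):
--         if cnt[v] % 2 == 1:
--             total += max(0, min(n - 1, v - 1) - max(0, v - 4) + 1)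
--     return total
-- ===== Notes on version B (the rewrite author's own statement) =====
-- stated objective: faster
-- what changed: Instead of simulating all k toggle steps on an n x 4 matrix (or scanning divisors per cell), B runs one harmonic-sum sieve over the distinct cell values 1..n+3 to get every value's divisor count in [1,k] at once, then sums each value's parity weighted by the number of cells carrying that value.
import Mathlib
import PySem

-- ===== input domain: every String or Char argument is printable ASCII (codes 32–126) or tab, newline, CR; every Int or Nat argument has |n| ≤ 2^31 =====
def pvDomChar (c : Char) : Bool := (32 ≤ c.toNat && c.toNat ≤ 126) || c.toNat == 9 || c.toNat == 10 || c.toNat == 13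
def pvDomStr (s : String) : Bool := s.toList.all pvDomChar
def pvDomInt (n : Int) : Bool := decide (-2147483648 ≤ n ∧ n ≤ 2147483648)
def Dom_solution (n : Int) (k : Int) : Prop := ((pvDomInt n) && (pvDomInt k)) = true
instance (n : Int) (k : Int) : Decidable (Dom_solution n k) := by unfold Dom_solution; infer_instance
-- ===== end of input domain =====

-- B replaces A's k-step toggle simulation on an n×4 matrix by one multiples sieve
-- over the distinct cell values 1..n+3 plus a multiplicity-weighted parity sum, for speed.

-- ===== PORT A =====
-- literal port: matrix of n rows [0,0,0,0]; for t in 1..k toggle matrix[i][j] when (i+j+1)%t==0.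
-- i, j come from range(0,·), so they are nonnegative and in bounds: .toNat is exact here.
def solution (n : Int) (k : Int) : Int :=
  let matrix : List (List Int) := (PySem.List.pyRange 0 n 1).map (fun _ => [0, 0, 0, 0])
  let matrix :=
    (PySem.List.pyRange 1 (k + 1) 1).foldl (fun m t =>
      (PySem.List.pyRange 0 n 1).foldl (fun m i =>
        (PySem.List.pyRange 0 4 1).foldl (fun m j =>
          if PySem.Int.mod (i + j + 1) t = 0 then
            m.modify i.toNat (fun row => row.modify j.toNat (fun x => PySem.Int.bxor x 1))
          else m) m) m) matrix
  matrix.foldl (fun s r => s + r.foldl (· + ·) 0) 0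

-- ===== PORT B =====
-- literal port of Source B: sieve cnt[v] = #divisors of v in [1, k] for v = 1..n+3 by
-- walking multiples of each d, then sum each value's parity times its cell multiplicity.
-- q comes from range(d, m+1, d) and v from range(1, m+1), so the indices cnt[q], cnt[v]
-- are nonnegative and in range: .modify / pyGetD are exact here.
def solution_alt (n : Int) (k : Int) : Int :=
  let m := n + 3
  let cnt : List Int := PySem.List.pyRepeat [0] (m + 1)
  let cnt :=
    (PySem.List.pyRange 1 (min k m + 1) 1).foldl (fun c d =>
      (PySem.List.pyRange d (m + 1) d).foldl (fun c q =>
        c.modify q.toNat (fun x => x + 1)) c) cnt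
  (PySem.List.pyRange 1 (m + 1) 1).foldl (fun total v =>
    if PySem.Int.mod (PySem.List.pyGetD cnt v 0) 2 = 1 then
      total + max 0 (min (n - 1) (v - 1) - max 0 (v - 4) + 1)
    else total) 0

-- ===== PRECONDITION & SPEC =====
def Spec_solution (n : Int) (k : Int) (out : Int) : Prop := out = solution_alt n k
instance (n : Int) (k : Int) (out : Int) : Decidable (Spec_solution n k out) := by unfold Spec_solution; infer_instance

-- ===== CLAIM (what is proved, stated in full; the proofs are below) =====
def Claim_equal_solution : Prop := ∀ (n : Int) (k : Int), Dom_solution n k → Spec_solution n k (solution n k)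

-- ===== LEMMAS AND PROOFS =====

-- one toggle step on a single cell holding bit b, for cell value v at time t
def pvFlip (v t b : Int) : Int := if PySem.Int.mod v t = 0 then PySem.Int.bxor b 1 else b

-- the per-cell final bit: parity of the number of divisors of v in [1, k]
def pvF (k v : Int) : Int :=
  PySem.Int.mod (((PySem.List.pyRange 1 (k + 1) 1).countP
    (fun t => decide (PySem.Int.mod v t = 0)) : Nat) : Int) 2

-- number of cells (i, j), 0 ≤ i < n, 0 ≤ j < 4, with i+j+1 = v
def pvW (n v : Int) : Int := max 0 (min (n - 1) (v - 1) - max 0 (v - 4) + 1)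

-- the matrix in "map form": row i = bits of cells i+1 .. i+4
def pvMat (n : Int) (p : Int → Int) : List (List Int) :=
  (PySem.List.pyRange 0 n 1).map (fun i => [p (i + 1), p (i + 2), p (i + 3), p (i + 4)])

theorem pv_range4 : PySem.List.pyRange 0 4 1 = [0, 1, 2, 3] := by decide

-- generic: a fold of conditional modifies at ONE fixed position lifts to a single modify
theorem pv_lift_modify {α : Type} (l : List Int) (m : List α) (iN : Nat)
    (c : Int → Prop) [DecidablePred c] (f : Int → α → α) :
    l.foldl (fun m j => if c j then m.modify iN (f j) else m) m
      = m.modify iN (fun row => l.foldl (fun row j => if c j then f j row else row) row) := by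
  induction l generalizing m with
  | nil => exact (List.modify_id iN m).symm
  | cons j rest ih =>
    simp only [List.foldl_cons]
    by_cases h : c j
    · simp only [if_pos h]
      rw [ih]
      apply List.ext_getElem?
      intro p
      simp only [List.getElem?_modify]
      cases m[p]? <;> by_cases hp : iN = p <;> simp [hp]
    · simp only [if_neg h]
      rw [ih]

-- generic: a fold of modifies at pairwise-distinct nonnegative indices, read elementwise
theorem pv_foldl_modify_getElem {α : Type} (l : List Int) (m : List α) (g : Int → α → α)
    (hnd : l.Nodup) (hnn : ∀ x ∈ l, 0 ≤ x) (p : Nat) :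
    (l.foldl (fun m i => m.modify i.toNat (g i)) m)[p]?
      = if (p : Int) ∈ l then (m[p]?).map (g p) else m[p]? := by
  induction l generalizing m with
  | nil => simp
  | cons i rest ih =>
    simp only [List.foldl_cons]
    have hi0 : 0 ≤ i := hnn i (by simp)
    have hnd' := hnd
    rw [List.nodup_cons] at hnd'
    rw [ih (m.modify i.toNat (g i)) hnd'.2 (fun x hx => hnn x (by simp [hx]))]
    by_cases hp : (p : Int) ∈ rest
    · have hne : (p : Int) ≠ i := fun h => hnd'.1 (h ▸ hp)
      simp only [hp, if_true, List.mem_cons, or_true, if_true]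
      rw [List.getElem?_modify]
      have hne' : i.toNat ≠ p := by omega
      cases m[p]? <;> simp [hne']
    · rw [List.getElem?_modify]
      by_cases hpi : (p : Int) = i
      · have he : i.toNat = p := by omega
        rw [if_neg hp, if_pos (List.mem_cons.mpr (Or.inl hpi))]
        cases m[p]? <;> simp [he, hpi]
      · have hne' : i.toNat ≠ p := by omega
        simp [List.mem_cons, hpi, hp, hne']

-- the j-loop on a 4-element row in map form
theorem pv_row_step (i t a b c d : Int) :
    (PySem.List.pyRange 0 4 1).foldl
        (fun row j => if PySem.Int.mod (i + j + 1) t = 0 then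
            row.modify j.toNat (fun x => PySem.Int.bxor x 1) else row) [a, b, c, d]
      = [pvFlip (i + 1) t a, pvFlip (i + 2) t b, pvFlip (i + 3) t c, pvFlip (i + 4) t d] := by
  rw [pv_range4]
  simp only [List.foldl_cons, List.foldl_nil, pvFlip]
  have e0 : i + 0 + 1 = i + 1 := by ring
  have e1 : i + 1 + 1 = i + 2 := by ring
  have e2 : i + 2 + 1 = i + 3 := by ring
  have e3 : i + 3 + 1 = i + 4 := by ring
  rw [e0, e1, e2, e3]
  split_ifs <;> simp [List.modify]

-- one full time step t maps pvMat n p to pvMat n (fun v => pvFlip v t (p v))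
theorem pv_time_step (n t : Int) (p : Int → Int) :
    (PySem.List.pyRange 0 n 1).foldl (fun m i =>
        (PySem.List.pyRange 0 4 1).foldl (fun m j =>
          if PySem.Int.mod (i + j + 1) t = 0 then
            m.modify i.toNat (fun row => row.modify j.toNat (fun x => PySem.Int.bxor x 1))
          else m) m) (pvMat n p)
      = pvMat n (fun v => pvFlip v t (p v)) := by
  have hstep : ∀ (m : List (List Int)) (i : Int),
      (PySem.List.pyRange 0 4 1).foldl (fun m j =>
          if PySem.Int.mod (i + j + 1) t = 0 then
            m.modify i.toNat (fun row => row.modify j.toNat (fun x => PySem.Int.bxor x 1))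
          else m) m
        = m.modify i.toNat (fun row => (PySem.List.pyRange 0 4 1).foldl
            (fun row j => if PySem.Int.mod (i + j + 1) t = 0 then
                row.modify j.toNat (fun x => PySem.Int.bxor x 1) else row) row) :=
    fun m i => pv_lift_modify (PySem.List.pyRange 0 4 1) m i.toNat
      (fun j => PySem.Int.mod (i + j + 1) t = 0)
      (fun j row => row.modify j.toNat (fun x => PySem.Int.bxor x 1))
  simp only [hstep]
  apply List.ext_getElem?
  intro q
  rw [pv_foldl_modify_getElem _ _ _ (PySem.List.nodup_pyRange_one 0 n)
        (fun x hx => ((PySem.List.mem_pyRange_one).mp hx).1) q]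
  simp only [pvMat, List.getElem?_map]
  cases hEq : (PySem.List.pyRange 0 n 1)[q]? with
  | none => simp
  | some x =>
    rw [PySem.List.getElem?_pyRange_one] at hEq
    have hq : q < (n - 0).toNat := by
      by_contra h
      rw [if_neg h] at hEq
      simp at hEq
    rw [if_pos hq] at hEq
    obtain rfl : x = 0 + (q : Int) := (Option.some.inj hEq).symm
    have hmem : ((q : Int)) ∈ PySem.List.pyRange 0 n 1 :=
      PySem.List.mem_pyRange_one.mpr ⟨by omega, by omega⟩
    rw [if_pos hmem]
    simp only [Option.map_some]
    rw [pv_row_step]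
    simp

-- the whole t-loop in map form
theorem pv_all_steps (n : Int) (ts : List Int) (p : Int → Int) :
    ts.foldl (fun m t =>
        (PySem.List.pyRange 0 n 1).foldl (fun m i =>
          (PySem.List.pyRange 0 4 1).foldl (fun m j =>
            if PySem.Int.mod (i + j + 1) t = 0 then
              m.modify i.toNat (fun row => row.modify j.toNat (fun x => PySem.Int.bxor x 1))
            else m) m) m) (pvMat n p)
      = pvMat n (fun v => ts.foldl (fun b t => pvFlip v t b) (p v)) := by
  induction ts generalizing p with
  | nil => simp
  | cons t rest ih =>
    simp only [List.foldl_cons]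
    rw [pv_time_step, ih]

-- xor-fold from a bit is the parity of (bit + divisor count)
theorem pv_bit_parity (ts : List Int) (v : Int) (b : Int) (hb : b = 0 ∨ b = 1) :
    ts.foldl (fun b t => pvFlip v t b) b
      = PySem.Int.mod (b + ((ts.countP (fun t => decide (PySem.Int.mod v t = 0)) : Nat) : Int)) 2 := by
  induction ts generalizing b with
  | nil =>
    rcases hb with h | h <;> subst h <;>
      simp only [List.foldl_nil, List.countP_nil, Nat.cast_zero, add_zero] <;> decide
  | cons t rest ih =>
    simp only [List.foldl_cons, List.countP_cons]
    by_cases h : PySem.Int.mod v t = 0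
    · rcases hb with hb | hb <;> subst hb
      · rw [show pvFlip v t 0 = 1 from by simp only [pvFlip, if_pos h]; decide,
            ih 1 (Or.inr rfl)]
        simp only [h, decide_true,
          PySem.Int.mod_eq_emod_of_pos (show (0:Int) < 2 by norm_num)]
        push_cast
        omega
      · rw [show pvFlip v t 1 = 0 from by simp only [pvFlip, if_pos h]; decide,
            ih 0 (Or.inl rfl)]
        simp only [h, decide_true,
          PySem.Int.mod_eq_emod_of_pos (show (0:Int) < 2 by norm_num)]
        push_cast
        omega
    · rw [show pvFlip v t b = b from by simp only [pvFlip, if_neg h], ih b hb]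
      simp [h]

-- a positive-step range has no duplicates
theorem pv_nodup_pyRange_pos (a b s : Int) (hs : 0 < s) : (PySem.List.pyRange a b s).Nodup := by
  rw [PySem.List.pyRange_of_pos a b hs]
  exact List.nodup_range.map (fun k₁ k₂ h => by
    have h' : s * (k₁ : Int) = s * (k₂ : Int) := by omega
    exact_mod_cast mul_left_cancel₀ (ne_of_gt hs) h')

-- the sieve's double fold, read at one position p: it adds, to the initial entry,
-- the number of rounds d whose multiple list hits p
theorem pv_sieve_get (m : Int) (ds : List Int) (hds : ∀ d ∈ ds, 1 ≤ d)
    (cs : List Int) (p : Nat) :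
    (ds.foldl (fun cs d =>
        (PySem.List.pyRange d (m + 1) d).foldl (fun cs q =>
          cs.modify q.toNat (fun x => x + 1)) cs) cs)[p]?
      = (cs[p]?).map (fun x => x +
          ((ds.countP (fun d => decide ((p : Int) ∈ PySem.List.pyRange d (m + 1) d)) : Nat) : Int)) := by
  induction ds generalizing cs with
  | nil => cases h : cs[p]? <;> simp [h]
  | cons d rest ih =>
    have hd : (1:Int) ≤ d := hds d (by simp)
    simp only [List.foldl_cons, List.countP_cons]
    rw [ih (fun e he => hds e (by simp [he]))]
    rw [pv_foldl_modify_getElem _ _ (fun _ x => x + 1)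
          (pv_nodup_pyRange_pos d (m + 1) d (by omega))
          (fun x hx => by
            have := ((PySem.List.mem_pyRange_iff_of_pos (by omega) x).mp hx).1
            omega) p]
    by_cases hmem : (p : Int) ∈ PySem.List.pyRange d (m + 1) d
    · simp only [hmem, if_true, decide_true]
      cases h : cs[p]?
      · simp
      · simp
        ring
    · simp only [hmem, if_false, decide_false]
      cases h : cs[p]?
      · simp
      · simp

-- the entry at 1 ≤ v ≤ m after the sieve is the divisor count of v over 1..min(k,m)
theorem pv_cnt_at (k m v : Int) (h1 : 1 ≤ v) (h2 : v ≤ m) :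
    PySem.List.pyGetD
      ((PySem.List.pyRange 1 (min k m + 1) 1).foldl (fun c d =>
        (PySem.List.pyRange d (m + 1) d).foldl (fun c q =>
          c.modify q.toNat (fun x => x + 1)) c)
        (PySem.List.pyRepeat [0] (m + 1))) v 0
      = (((PySem.List.pyRange 1 (min k m + 1) 1).countP
          (fun d => decide (PySem.Int.mod v d = 0)) : Nat) : Int) := by
  rw [PySem.List.pyGetD_of_nonneg _ _ (by omega),
      List.getD_eq_getElem?_getD,
      pv_sieve_get m _ (fun d hd => ((PySem.List.mem_pyRange_one).mp hd).1) _ v.toNat,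
      PySem.List.pyRepeat_singleton, List.getElem?_replicate, if_pos (by omega)]
  simp only [Option.map_some, Option.getD_some, zero_add]
  have hv : ((v.toNat : Int)) = v := by omega
  congr 1
  apply List.countP_congr
  intro d hd
  have hd1 : (1:Int) ≤ d := ((PySem.List.mem_pyRange_one).mp hd).1
  simp only [decide_eq_true_eq]
  rw [PySem.List.mem_pyRange_iff_of_pos (by omega), hv, PySem.Int.mod_eq_zero_iff_dvd]
  constructor
  · rintro ⟨-, -, h⟩
    have : d ∣ (v - d) + d := dvd_add h (dvd_refl d)
    simpa using this
  · intro h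
    exact ⟨Int.le_of_dvd (by omega) h, by omega, dvd_sub h (dvd_refl d)⟩

-- divisor counts over 1..k and over 1..min(k,c) agree for 1 ≤ v ≤ c
theorem pv_count_cap (k c v : Int) (hv : 1 ≤ v) (hvc : v ≤ c) :
    ((PySem.List.pyRange 1 (k + 1) 1).countP (fun t => decide (PySem.Int.mod v t = 0)))
      = ((PySem.List.pyRange 1 (min k c + 1) 1).countP (fun t => decide (PySem.Int.mod v t = 0))) := by
  by_cases hk : k ≤ c
  · rw [min_eq_left hk]
  · have hk' : c < k := lt_of_not_ge hk
    rw [min_eq_right hk'.le]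
    rw [PySem.List.pyRange_one_append 1 (c + 1) (k + 1) (by omega) (by omega)]
    rw [List.countP_append]
    have hz : (PySem.List.pyRange (c + 1) (k + 1) 1).countP
        (fun t => decide (PySem.Int.mod v t = 0)) = 0 := by
      rw [List.countP_eq_zero]
      intro t ht
      rw [PySem.List.mem_pyRange_one] at ht
      have hmod : PySem.Int.mod v t = v := by
        rw [PySem.Int.mod_eq_emod_of_pos (by omega)]
        exact Int.emod_eq_of_lt (by omega) (by omega)
      simp [hmod]; omega
    omega

-- three consecutive integers as a range
theorem pv_range3 (a : Int) : PySem.List.pyRange a (a + 3) 1 = [a, a + 1, a + 2] := by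
  rw [PySem.List.pyRange_one_cons (by omega), PySem.List.pyRange_one_cons (by omega),
      PySem.List.pyRange_one_cons (by omega), PySem.List.pyRange_one_eq_nil (by omega)]
  simp
  omega

-- the reindexing identity: summing f over the 4 cells of every row equals summing
-- f over the distinct values 1..n+3 weighted by multiplicity pvW
theorem pv_reindex_nat (f : Int → Int) (N : Nat) :
    ((PySem.List.pyRange 0 (N : Int) 1).map
        (fun i => f (i + 1) + f (i + 2) + f (i + 3) + f (i + 4))).sum
      = ((PySem.List.pyRange 1 ((N : Int) + 4) 1).map (fun v => pvW (N : Int) v * f v)).sum := by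
  induction N with
  | zero =>
    rw [show ((0:Nat):Int) = 0 by norm_num]
    rw [PySem.List.pyRange_one_eq_nil (by omega)]
    rw [show (0:Int) + 4 = 1 + 3 by norm_num, pv_range3]
    simp only [List.map_nil, List.sum_nil, List.map_cons, List.sum_cons, List.sum_nil]
    norm_num [pvW]
  | succ N ih =>
    have hc : (((N + 1 : Nat)) : Int) = (N : Int) + 1 := by push_cast; ring
    rw [hc]
    rw [PySem.List.pyRange_one_succ_right (by omega : (0:Int) ≤ (N : Int))]
    rw [show ((N : Int) + 1) + 4 = ((N : Int) + 4) + 1 by ring]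
    rw [PySem.List.pyRange_one_succ_right (by omega : (1:Int) ≤ (N : Int) + 4)]
    simp only [List.map_append, List.sum_append, List.map_cons, List.map_nil,
      List.sum_cons, List.sum_nil]
    -- shift the weights on 1..N+3 from n = N+1 back to n = N plus an indicator
    have hshift :
        ((PySem.List.pyRange 1 ((N : Int) + 4) 1).map
            (fun v => pvW ((N : Int) + 1) v * f v)).sum
          = ((PySem.List.pyRange 1 ((N : Int) + 4) 1).map
              (fun v => pvW (N : Int) v * f v
                + (if (N : Int) + 1 ≤ v then 1 else 0) * f v)).sum := by
      apply congrArg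
      apply List.map_congr_left
      intro v hv
      rw [PySem.List.mem_pyRange_one] at hv
      have hw : pvW ((N : Int) + 1) v
          = pvW (N : Int) v + (if (N : Int) + 1 ≤ v then 1 else 0) := by
        simp only [pvW]
        split_ifs <;> omega
      rw [hw, add_mul]
    have hsum := PySem.List.sum_map_add_int (PySem.List.pyRange 1 ((N : Int) + 4) 1)
      (fun v => pvW (N : Int) v * f v) (fun v => (if (N : Int) + 1 ≤ v then 1 else 0) * f v)
    rw [hshift, hsum, ih]
    -- the indicator part sums to f(N+1) + f(N+2) + f(N+3)
    have hind :
        ((PySem.List.pyRange 1 ((N : Int) + 4) 1).map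
            (fun v => (if (N : Int) + 1 ≤ v then 1 else 0) * f v)).sum
          = f ((N : Int) + 1) + f ((N : Int) + 2) + f ((N : Int) + 3) := by
      rw [PySem.List.pyRange_one_append 1 ((N : Int) + 1) ((N : Int) + 4)
            (by omega) (by omega)]
      rw [List.map_append, List.sum_append]
      have h0 : ((PySem.List.pyRange 1 ((N : Int) + 1) 1).map
          (fun v => (if (N : Int) + 1 ≤ v then 1 else 0) * f v)).sum = 0 := by
        apply List.sum_eq_zero
        intro x hx
        rcases List.mem_map.mp hx with ⟨v, hv, rfl⟩
        rw [PySem.List.mem_pyRange_one] at hv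
        rw [if_neg (by omega)]
        ring
      rw [h0, show (N : Int) + 4 = ((N : Int) + 1) + 3 by ring, pv_range3]
      simp only [List.map_cons, List.map_nil, List.sum_cons, List.sum_nil]
      rw [if_pos (by omega), if_pos (by omega), if_pos (by omega)]
      ring_nf
    rw [hind]
    have hlast : pvW ((N : Int) + 1) ((N : Int) + 4) = 1 := by
      simp only [pvW]; omega
    rw [hlast]
    ring

theorem pv_reindex (f : Int → Int) (n : Int) :
    ((PySem.List.pyRange 0 n 1).map
        (fun i => f (i + 1) + f (i + 2) + f (i + 3) + f (i + 4))).sum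
      = ((PySem.List.pyRange 1 (n + 4) 1).map (fun v => pvW n v * f v)).sum := by
  by_cases hn : 0 ≤ n
  · obtain ⟨N, rfl⟩ := Int.eq_ofNat_of_zero_le hn
    exact pv_reindex_nat f N
  · rw [PySem.List.pyRange_one_eq_nil (by omega : n ≤ 0)]
    symm
    simp only [List.map_nil, List.sum_nil]
    apply List.sum_eq_zero
    intro x hx
    rcases List.mem_map.mp hx with ⟨v, hv, rfl⟩
    rw [PySem.List.mem_pyRange_one] at hv
    have : pvW n v = 0 := by simp only [pvW]; omega
    rw [this, zero_mul]

-- ===== VERDICT (by name: the statement is the Claim_ definition above) =====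
theorem solution_spec : Claim_equal_solution := by
  intro n k _
  show solution n k = solution_alt n k
  -- A side: simulation = weighted parity sum
  simp only [solution]
  have hinit : (PySem.List.pyRange 0 n 1).map (fun _ => [(0:Int), 0, 0, 0])
      = pvMat n (fun _ => 0) := rfl
  rw [hinit, pv_all_steps]
  have hq : ∀ v : Int,
      (PySem.List.pyRange 1 (k + 1) 1).foldl (fun b t => pvFlip v t b) 0 = pvF k v := by
    intro v
    rw [pv_bit_parity _ _ _ (Or.inl rfl), zero_add]
    rfl
  unfold pvMat
  rw [List.foldl_map]
  have hA : (PySem.List.pyRange 0 n 1).foldl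
      (fun s i => s +
        [(PySem.List.pyRange 1 (k + 1) 1).foldl (fun b t => pvFlip (i+1) t b) 0,
         (PySem.List.pyRange 1 (k + 1) 1).foldl (fun b t => pvFlip (i+2) t b) 0,
         (PySem.List.pyRange 1 (k + 1) 1).foldl (fun b t => pvFlip (i+3) t b) 0,
         (PySem.List.pyRange 1 (k + 1) 1).foldl (fun b t => pvFlip (i+4) t b) 0].foldl (· + ·) 0) 0
      = (PySem.List.pyRange 0 n 1).foldl
          (fun s i => s + (pvF k (i+1) + pvF k (i+2) + pvF k (i+3) + pvF k (i+4))) 0 := by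
    apply PySem.List.foldl_congr_mem
    intro acc i _
    simp only [List.foldl_cons, List.foldl_nil, hq]
    ring
  rw [hA, PySem.List.foldl_add, zero_add, pv_reindex (pvF k) n]
  -- B side: sieve loop = the same weighted parity sum
  simp only [solution_alt]
  symm
  have hB : (PySem.List.pyRange 1 (n + 3 + 1) 1).foldl (fun total v =>
      if PySem.Int.mod (PySem.List.pyGetD
          ((PySem.List.pyRange 1 (min k (n + 3) + 1) 1).foldl (fun c d =>
            (PySem.List.pyRange d (n + 3 + 1) d).foldl (fun c q =>
              c.modify q.toNat (fun x => x + 1)) c)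
            (PySem.List.pyRepeat [0] (n + 3 + 1))) v 0) 2 = 1 then
        total + max 0 (min (n - 1) (v - 1) - max 0 (v - 4) + 1)
      else total) 0
      = (PySem.List.pyRange 1 (n + 3 + 1) 1).foldl
          (fun total v => total + pvW n v * pvF k v) 0 := by
    apply PySem.List.foldl_congr_mem
    intro acc v hv
    rw [PySem.List.mem_pyRange_one] at hv
    rw [pv_cnt_at k (n + 3) v (by omega) (by omega)]
    have hcc : ((((PySem.List.pyRange 1 (min k (n + 3) + 1) 1).countP
        (fun d => decide (PySem.Int.mod v d = 0)) : Nat)) : Int)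
        = (((PySem.List.pyRange 1 (k + 1) 1).countP
            (fun t => decide (PySem.Int.mod v t = 0)) : Nat) : Int) := by
      exact_mod_cast (pv_count_cap k (n + 3) v (by omega) (by omega)).symm
    rw [hcc]
    have hWdef : max 0 (min (n - 1) (v - 1) - max 0 (v - 4) + 1) = pvW n v := rfl
    rcases PySem.Int.mod_two_eq (((PySem.List.pyRange 1 (k + 1) 1).countP
        (fun t => decide (PySem.Int.mod v t = 0)) : Nat) : Int) with h0 | h1
    · rw [if_neg (by rw [show (PySem.Int.mod _ 2) = 0 from h0]; norm_num)]
      rw [show pvF k v = 0 from h0]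
      ring
    · rw [if_pos h1, show pvF k v = 1 from h1, hWdef]
      ring
  rw [hB, PySem.List.foldl_add, zero_add]
  rw [show n + 3 + 1 = n + 4 by ring]
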